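-- pv_equiv track=rewrite | github.com/dicer0/p_Python_ESP | a1.-Data Science/24.1.-Ejercicios Estructuras de Datos.py | vector_transformation
-- ===== SOURCE A (Python) =====
-- def vector_transformation(a):
--     vector_b = []
--     for i in range(0, len(a)):      #b[i] = izquierda + actual + derecha.
--         posicion_b = a[i]           #b[i] = actual;                         Siempre existe el actual.
--         if(i > 0):
--             posicion_b += a[i - 1]  #b[i] = izquierda + actual;             i = 0 → no hay izquierda → usar 0.
--         if(i < len(a) - 1):
--             posicion_b += a[i + 1]  #b[i] = izquierda + actual + derecha;   i = len(a) = último → no hay derecha → usar 0.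
--         vector_b.append(posicion_b) #Para cada elemento del vector a, se crea la nueva posición del vector_b.
--     return vector_b
-- ===== SOURCE B (Python) =====
-- def vector_transformation(a):
--     s = [0]                              # prefix sums: s[k] = a[0] + ... + a[k-1]
--     for x in a:
--         s.append(s[-1] + x)
--     n = len(a)
--     return [s[min(i + 2, n)] - s[max(i - 1, 0)] for i in range(n)]
-- ===== Notes on version B (the rewrite author's own statement) =====
-- stated objective: alternative
-- what changed: B first builds the prefix-sum array S of a in one pass and then reads each output as the range-sum difference S[min(i+2,n)] - S[max(i-1,0)], replacing A's per-index neighbor additions with two boundary if-guards by prefix-sum range queries.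
import Mathlib
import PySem

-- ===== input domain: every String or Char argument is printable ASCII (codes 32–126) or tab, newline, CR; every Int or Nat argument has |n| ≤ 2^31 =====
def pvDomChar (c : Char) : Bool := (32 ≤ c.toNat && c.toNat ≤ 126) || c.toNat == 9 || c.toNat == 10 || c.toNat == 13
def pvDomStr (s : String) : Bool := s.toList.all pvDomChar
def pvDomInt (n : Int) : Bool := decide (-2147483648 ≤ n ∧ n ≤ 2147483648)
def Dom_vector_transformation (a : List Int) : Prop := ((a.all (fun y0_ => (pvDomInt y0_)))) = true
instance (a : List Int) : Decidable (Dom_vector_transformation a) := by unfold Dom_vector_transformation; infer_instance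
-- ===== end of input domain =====

-- B computes the result via a prefix-sum array and per-index range-sum differences instead of A's guarded neighbor additions (objective: alternative).


-- ===== PORT A =====
-- literal port of A; every a[i], a[i-1], a[i+1] access is guarded in range, so pyGetD is exact here
def vector_transformation (a : List Int) : List Int :=
  (PySem.List.pyRange 0 (a.length : Int) 1).foldl (fun vector_b i =>
    let p0 := PySem.List.pyGetD a i 0
    let p1 := if i > 0 then p0 + PySem.List.pyGetD a (i - 1) 0 else p0
    let p2 := if i < (a.length : Int) - 1 then p1 + PySem.List.pyGetD a (i + 1) 0 else p1
    vector_b ++ [p2]) []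

-- ===== PORT B =====
-- literal port of Source B; s[-1] is pyGetD at -1 (s is always nonempty), and both lookups in the
-- final comprehension are in range (0 ≤ max(i-1,0) ≤ min(i+2,n) ≤ n < len s), so pyGetD is exact
def vector_transformation_alt (a : List Int) : List Int :=
  let s := a.foldl (fun s x => s ++ [PySem.List.pyGetD s (-1) 0 + x]) [0]
  let n := (a.length : Int)
  (PySem.List.pyRange 0 n 1).map (fun i =>
    PySem.List.pyGetD s (min (i + 2) n) 0 - PySem.List.pyGetD s (max (i - 1) 0) 0)

-- ===== PRECONDITION & SPEC =====
def Spec_vector_transformation (a : List Int) (out : List Int) : Prop := out = vector_transformation_alt a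
instance (a : List Int) (out : List Int) : Decidable (Spec_vector_transformation a out) := by unfold Spec_vector_transformation; infer_instance

-- ===== CLAIM =====
def Claim_equal_vector_transformation : Prop := ∀ (a : List Int), Dom_vector_transformation a → Spec_vector_transformation a (vector_transformation a)

-- ===== LEMMAS AND PROOFS =====

-- zeta-reduced per-index value of A's loop body (proof helper)
def aBody (a : List Int) (i : Int) : Int :=
  if i < (a.length : Int) - 1 then
    (if i > 0 then PySem.List.pyGetD a i 0 + PySem.List.pyGetD a (i - 1) 0 else PySem.List.pyGetD a i 0)
      + PySem.List.pyGetD a (i + 1) 0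
  else
    (if i > 0 then PySem.List.pyGetD a i 0 + PySem.List.pyGetD a (i - 1) 0 else PySem.List.pyGetD a i 0)

-- prefix-sum value (proof helper): T a k = a[0] + ... + a[k-1]
def T (a : List Int) (k : Nat) : Int := ((a.take k).sum)

-- the loop in Source B builds exactly the prefix-sum list
lemma build_prefix (a : List Int) :
    a.foldl (fun s x => s ++ [PySem.List.pyGetD s (-1) 0 + x]) [0]
      = (List.range (a.length + 1)).map (fun k => T a k) := by
  induction a using List.reverseRecOn with
  | nil => simp [T]
  | append_singleton a x ih =>
    rw [List.foldl_append, ih]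
    simp only [List.foldl_cons, List.foldl_nil]
    have hsplit : (List.range (a.length + 1)).map (fun k => T a k)
        = (List.range a.length).map (fun k => T a k) ++ [T a a.length] := by
      rw [List.range_succ, List.map_append]; rfl
    have hlast : PySem.List.pyGetD ((List.range (a.length + 1)).map (fun k => T a k)) (-1) 0
        = a.sum := by
      rw [hsplit, PySem.List.pyGetD_neg_one_append_singleton]
      simp [T]
    rw [hlast]
    have hrhs : (List.range ((a ++ [x]).length + 1)).map (fun k => T (a ++ [x]) k)
        = (List.range (a.length + 1)).map (fun k => T (a ++ [x]) k) ++ [T (a ++ [x]) (a.length + 1)] := by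
      rw [show (a ++ [x]).length = a.length + 1 by simp, List.range_succ, List.map_append]; rfl
    rw [hrhs]
    congr 1
    · apply List.map_congr_left
      intro k hk
      rw [List.mem_range] at hk
      simp only [T]
      rw [List.take_append_of_le_length (by omega)]
    · simp [T]

-- reading the prefix-sum list at an in-range index
lemma prefix_get (a : List Int) (j : Int) (h0 : 0 ≤ j) (h1 : j ≤ (a.length : Int)) :
    PySem.List.pyGetD ((List.range (a.length + 1)).map (fun k => T a k)) j 0 = T a j.toNat := by
  rw [PySem.List.pyGetD_eq_getElem _ _ h0
      (by simp only [List.length_map, List.length_range]; omega)]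
  simp

-- a single element as a difference of adjacent prefix sums
lemma getD_eq_T (a : List Int) (k : Nat) (hk : k < a.length) :
    PySem.List.pyGetD a (k : Int) 0 = T a (k + 1) - T a k := by
  rw [PySem.List.pyGetD_natCast, List.getD_eq_getElem a 0 hk]
  simp only [T]
  rw [List.sum_take_succ a k hk]
  ring

-- ===== VERDICT =====
theorem vector_transformation_spec : Claim_equal_vector_transformation := by
  intro a _
  unfold Spec_vector_transformation
  have hA : vector_transformation a
      = (PySem.List.pyRange 0 (a.length : Int) 1).map (aBody a) :=
    (PySem.List.foldl_append_singleton_eq_map (aBody a) _ []).trans (List.nil_append _)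
  have hB : vector_transformation_alt a
      = (PySem.List.pyRange 0 (a.length : Int) 1).map (fun i =>
          PySem.List.pyGetD ((List.range (a.length + 1)).map (fun k => T a k)) (min (i + 2) (a.length : Int)) 0
            - PySem.List.pyGetD ((List.range (a.length + 1)).map (fun k => T a k)) (max (i - 1) 0) 0) := by
    unfold vector_transformation_alt
    rw [build_prefix]
  rw [hA, hB]
  apply List.map_congr_left
  intro i hi
  rw [PySem.List.mem_pyRange_one] at hi
  obtain ⟨h0i, h1i⟩ := hi
  -- name the Nat index
  obtain ⟨k, rfl⟩ : ∃ k : Nat, i = (k : Int) := ⟨i.toNat, (Int.toNat_of_nonneg h0i).symm⟩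
  have hk : k < a.length := by omega
  unfold aBody
  by_cases hL : (k : Int) > 0
  · have hk1 : 1 ≤ k := by omega
    have e1 : (k : Int) - 1 = ((k - 1 : Nat) : Int) := by omega
    have emax : max ((k : Int) - 1) 0 = ((k - 1 : Nat) : Int) := by omega
    by_cases hR : (k : Int) < (a.length : Int) - 1
    · have emin : min ((k : Int) + 2) (a.length : Int) = ((k + 2 : Nat) : Int) := by omega
      rw [if_pos hR, if_pos hL, emax, emin, e1,
          show (k : Int) + 1 = ((k + 1 : Nat) : Int) by omega,
          prefix_get a _ (by omega) (by omega), prefix_get a _ (by omega) (by omega),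
          getD_eq_T a k hk, getD_eq_T a (k - 1) (by omega), getD_eq_T a (k + 1) (by omega),
          show ((k + 2 : Nat) : Int).toNat = k + 2 by omega,
          show ((k - 1 : Nat) : Int).toNat = k - 1 by omega,
          show k - 1 + 1 = k by omega]
      ring
    · have emin : min ((k : Int) + 2) (a.length : Int) = ((a.length : Nat) : Int) := by omega
      rw [if_neg hR, if_pos hL, emax, emin, e1,
          prefix_get a _ (by omega) (by omega), prefix_get a _ (by omega) (by omega),
          getD_eq_T a k hk, getD_eq_T a (k - 1) (by omega),
          show ((a.length : Nat) : Int).toNat = a.length by omega,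
          show ((k - 1 : Nat) : Int).toNat = k - 1 by omega,
          show k - 1 + 1 = k by omega,
          show a.length = k + 1 by omega]
      ring
  · have hk0 : k = 0 := by omega
    subst hk0
    have emax : max (((0 : Nat) : Int) - 1) 0 = ((0 : Nat) : Int) := by omega
    by_cases hR : ((0 : Nat) : Int) < (a.length : Int) - 1
    · have emin : min (((0 : Nat) : Int) + 2) (a.length : Int) = ((2 : Nat) : Int) := by omega
      rw [if_pos hR, if_neg hL,
          show ((0 : Nat) : Int) + 1 = ((1 : Nat) : Int) by omega, emax, emin,
          prefix_get a _ (by omega) (by omega), prefix_get a _ (by omega) (by omega),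
          getD_eq_T a 0 hk, getD_eq_T a 1 (by omega),
          show (((2 : Nat) : Int)).toNat = 2 by omega,
          show (((0 : Nat) : Int)).toNat = 0 by omega]
      ring
    · have emin : min (((0 : Nat) : Int) + 2) (a.length : Int) = ((a.length : Nat) : Int) := by omega
      rw [if_neg hR, if_neg hL, emax, emin,
          prefix_get a _ (by omega) (by omega), prefix_get a _ (by omega) (by omega),
          getD_eq_T a 0 hk,
          show ((a.length : Nat) : Int).toNat = a.length by omega,
          show (((0 : Nat) : Int)).toNat = 0 by omega,
          show a.length = 0 + 1 by omega]
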